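-- pv_equiv track=rewrite | github.com/ck999kk/For-report- | Desktop/WORK/professional_investigators_cybertrace/src/cybertrace/metadata_analyzer.py | _extract_modification_history
-- ===== SOURCE A (Python) =====
-- from typing import Dict, Any, List, Optional
--
-- def _extract_modification_history(properties: Dict[str, Any]) -> Dict[str, Any]:
--     """Extract modification history from document properties"""
--
--     mod_history = {}
--
--     history_keys = [
--         'Revision Number', 'Total Edit Time', 'Last Printed',
--         'Security', 'Shared', 'Doc Security'
--     ]
--
--     for key in history_keys:
--         if key in properties:
--             mod_history[key] = properties[key]
--
--     return mod_history
-- ===== SOURCE B (Python) =====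
-- _HISTORY_KEYS = [
--     'Revision Number', 'Total Edit Time', 'Last Printed',
--     'Security', 'Shared', 'Doc Security'
-- ]
-- _RANK = {k: i for i, k in enumerate(_HISTORY_KEYS)}
-- _MISSING = object()
--
--
-- def _extract_modification_history(properties):
--     """Extract modification history from document properties"""
--     # One pass over the input: drop each interesting value into its slot
--     # (bucket placement via a rank table), then emit the occupied slots
--     # in canonical order.
--     slots = [_MISSING] * len(_HISTORY_KEYS)
--     for k, v in properties.items():
--         i = _RANK.get(k)
--         if i is not None:
--             slots[i] = v
--     return {_HISTORY_KEYS[i]: slots[i]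
--             for i in range(len(_HISTORY_KEYS)) if slots[i] is not _MISSING}
-- ===== Notes on version B (the rewrite author's own statement) =====
-- stated objective: alternative
-- what changed: B replaces A's per-key membership probes over the fixed key list by a single bucket-placement pass over properties.items() (a rank table maps each seen key to its slot), then emits the occupied slots in canonical order.
import Mathlib
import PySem

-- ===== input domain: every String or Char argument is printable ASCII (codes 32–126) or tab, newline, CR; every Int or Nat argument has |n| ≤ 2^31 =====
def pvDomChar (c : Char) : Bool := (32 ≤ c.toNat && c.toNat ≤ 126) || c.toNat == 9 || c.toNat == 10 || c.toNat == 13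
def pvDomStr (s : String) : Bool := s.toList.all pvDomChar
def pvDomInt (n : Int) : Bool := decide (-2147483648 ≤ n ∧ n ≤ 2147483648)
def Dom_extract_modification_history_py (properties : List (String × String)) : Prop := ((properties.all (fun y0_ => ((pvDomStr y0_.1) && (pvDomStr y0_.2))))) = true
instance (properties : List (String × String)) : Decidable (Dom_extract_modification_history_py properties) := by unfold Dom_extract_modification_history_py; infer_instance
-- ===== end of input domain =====

-- B replaces A's per-key probing of the dict by one bucket-placement pass over properties
-- (rank table → slots) plus a canonical-order emission; same returned dict, proved below.

-- ===== PORT A =====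
def extract_modification_history_py (properties : List (String × String)) : List (String × String) :=
  let props : PySem.Dict String String := PySem.Dict.mk properties
  let history_keys : List String :=
    ["Revision Number", "Total Edit Time", "Last Printed", "Security", "Shared", "Doc Security"]
  -- for key in history_keys: if key in properties: mod_history[key] = properties[key]
  (history_keys.foldl (fun (d : PySem.Dict String String) key =>
      match props.get? key with
      | some v => d.insert key v
      | none   => d) PySem.Dict.empty).items

-- ===== PORT B =====
def pvHistoryKeysB : List String :=
  ["Revision Number", "Total Edit Time", "Last Printed", "Security", "Shared", "Doc Security"]

-- _RANK = {k: i for i, k in enumerate(_HISTORY_KEYS)}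
def pvRankB : PySem.Dict String Int :=
  PySem.Dict.ofList ((PySem.List.enumerate pvHistoryKeysB).map (fun p => (p.2, p.1)))

def extract_modification_history_py_alt (properties : List (String × String)) : List (String × String) :=
  -- slots = [_MISSING] * len(_HISTORY_KEYS); _MISSING ↦ none (the stored values are strings, so Option is exact)
  let slots0 : List (Option String) := List.replicate pvHistoryKeysB.length none
  -- for k, v in properties.items(): i = _RANK.get(k); if i is not None: slots[i] = v
  -- (the ranks stored in _RANK are the literals 0..5, nonnegative and < len(slots), so List.set i.toNat is exact)
  let slots := properties.foldl (fun (slots : List (Option String)) kv =>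
      match pvRankB.get? kv.1 with
      | some i => slots.set i.toNat (some kv.2)
      | none   => slots) slots0
  -- return {_HISTORY_KEYS[i]: slots[i] for i in range(len(_HISTORY_KEYS)) if slots[i] is not _MISSING}
  -- (every index is in range, so List.getD with an unused default is exact)
  (PySem.Dict.ofList ((List.range pvHistoryKeysB.length).filterMap
      (fun i => (slots.getD i none).map (fun v => (pvHistoryKeysB.getD i "", v))))).items

-- ===== PRECONDITION & SPEC =====
-- Pre_ excludes association lists with duplicate keys: a Python dict cannot hold a key twice,
-- so such lists represent no input the Python programs can receive.
def Pre_extract_modification_history_py (properties : List (String × String)) : Prop :=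
  (properties.map Prod.fst).Nodup
instance (properties : List (String × String)) : Decidable (Pre_extract_modification_history_py properties) := by unfold Pre_extract_modification_history_py; infer_instance

def pvWitness_extract_modification_history_py : (List (String × String)) :=
  [("Security", "1"), ("Author", "x"), ("Shared", "yes")]

def Spec_extract_modification_history_py (properties : List (String × String)) (out : List (String × String)) : Prop := out = extract_modification_history_py_alt properties
instance (properties : List (String × String)) (out : List (String × String)) : Decidable (Spec_extract_modification_history_py properties out) := by unfold Spec_extract_modification_history_py; infer_instance

-- ===== CLAIM (what is proved, stated in full; the proofs are below) =====
def Claim_equal_extract_modification_history_py : Prop := ∀ (properties : List (String × String)), Dom_extract_modification_history_py properties → Pre_extract_modification_history_py properties → Spec_extract_modification_history_py properties (extract_modification_history_py properties)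

-- ===== LEMMAS AND PROOFS =====

-- A's loop over fresh distinct keys appends exactly the pairs whose lookup succeeds.
theorem pvFoldA_items (ks : List String) (props d : PySem.Dict String String)
    (hnd : ks.Nodup) (hfresh : ∀ k ∈ ks, d.contains k = false) :
    (ks.foldl (fun (d : PySem.Dict String String) key =>
        match props.get? key with
        | some v => d.insert key v
        | none   => d) d).items
      = d.items ++ ks.filterMap (fun k => (props.get? k).map (fun v => (k, v))) := by
  induction ks generalizing d with
  | nil => simp
  | cons k t ih =>
    rcases List.nodup_cons.mp hnd with ⟨hk, hnt⟩
    cases hpk : props.get? k with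
    | none =>
      simp only [List.foldl_cons, hpk, List.filterMap_cons]
      exact ih d hnt (fun x hx => hfresh x (List.mem_cons_of_mem _ hx))
    | some v =>
      simp only [List.foldl_cons, hpk, List.filterMap_cons, Option.map_some]
      rw [ih (d.insert k v) hnt ?_]
      · rw [PySem.Dict.items_insert_of_not_contains _ _ (hfresh k (List.mem_cons_self))]
        simp
      · intro x hx
        rw [PySem.Dict.contains_insert]
        have hxk : x ≠ k := fun h => hk (h ▸ hx)
        simp [hxk, hfresh x (List.mem_cons_of_mem _ hx)]

-- closed form of the rank table's lookup
theorem pvRank_get? (a : String) : pvRankB.get? a =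
    if "Revision Number" = a then some 0 else if "Total Edit Time" = a then some 1
    else if "Last Printed" = a then some 2 else if "Security" = a then some 3
    else if "Shared" = a then some 4 else if "Doc Security" = a then some 5 else none := by
  have h : pvRankB = PySem.Dict.mk
      [("Revision Number", 0), ("Total Edit Time", 1), ("Last Printed", 2),
       ("Security", 3), ("Shared", 4), ("Doc Security", 5)] := by decide
  rw [h]
  simp only [PySem.Dict.get?_mk_cons, beq_iff_eq]
  rfl

theorem pvRankFact (r : Nat) (hr : r < 6) :
    pvRankB.get? (pvHistoryKeysB.getD r "") = some (r : Int) := by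
  interval_cases r <;> decide

theorem pvRankInj (a : String) (i : Int) (h : pvRankB.get? a = some i) :
    i.toNat < 6 ∧ pvHistoryKeysB.getD i.toNat "" = a := by
  rw [pvRank_get?] at h
  split_ifs at h with h1 h2 h3 h4 h5 h6
  · injection h with h; subst h; exact ⟨by decide, by simpa [pvHistoryKeysB] using h1⟩
  · injection h with h; subst h; exact ⟨by decide, by simpa [pvHistoryKeysB] using h2⟩
  · injection h with h; subst h; exact ⟨by decide, by simpa [pvHistoryKeysB] using h3⟩
  · injection h with h; subst h; exact ⟨by decide, by simpa [pvHistoryKeysB] using h4⟩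
  · injection h with h; subst h; exact ⟨by decide, by simpa [pvHistoryKeysB] using h5⟩
  · injection h with h; subst h; exact ⟨by decide, by simpa [pvHistoryKeysB] using h6⟩

theorem pvKeysInj (r s : Nat) (hr : r < 6) (hs : s < 6)
    (h : pvHistoryKeysB.getD r "" = pvHistoryKeysB.getD s "") : r = s := by
  interval_cases r <;> interval_cases s <;> simp_all [pvHistoryKeysB]

-- the slot array after B's pass: slot r holds the dict's value at the r-th history key
theorem pvSlots_spec (l : List (String × String)) (hnd : (l.map Prod.fst).Nodup)
    (slots : List (Option String)) (hlen : slots.length = 6) (r : Nat) (hr : r < 6) :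
    (l.foldl (fun (slots : List (Option String)) kv =>
        match pvRankB.get? kv.1 with
        | some i => slots.set i.toNat (some kv.2)
        | none   => slots) slots).getD r none
      = Option.or ((PySem.Dict.mk l).get? (pvHistoryKeysB.getD r "")) (slots.getD r none) := by
  induction l generalizing slots with
  | nil =>
    simp only [List.foldl_nil]
    rw [show (PySem.Dict.mk ([] : List (String × String))).get? (pvHistoryKeysB.getD r "") = none from rfl,
        Option.none_or]
  | cons kv t ih =>
    obtain ⟨a, b⟩ := kv
    rw [List.map_cons, List.nodup_cons] at hnd
    obtain ⟨ha, hnt⟩ := hnd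
    have ha' : a ∉ t.map Prod.fst := ha
    simp only [List.foldl_cons]
    have hfold1 : (match pvRankB.get? (a, b).1 with
        | some i => slots.set i.toNat (some b)
        | none   => slots)
        = (match pvRankB.get? a with
          | some i => slots.set i.toNat (some b)
          | none   => slots) := rfl
    rw [hfold1]
    cases hra : pvRankB.get? a with
    | none =>
      rw [ih hnt slots hlen]
      have hak : a ≠ pvHistoryKeysB.getD r "" := by
        intro h
        rw [h, pvRankFact r hr] at hra
        simp at hra
      rw [PySem.Dict.get?_mk_cons, if_neg (by simpa [List.getD] using hak)]
    | some i =>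
      rw [show (match some i with
          | some j => slots.set j.toNat (some b)
          | none   => slots) = slots.set i.toNat (some b) from rfl]
      obtain ⟨hi6, hia⟩ := pvRankInj a i hra
      by_cases hak : a = pvHistoryKeysB.getD r ""
      · have hir : i.toNat = r := pvKeysInj _ _ hi6 hr (by rw [hia, hak])
        rw [ih hnt _ (by rw [List.length_set, hlen])]
        have h0 : (PySem.Dict.mk t).get? (pvHistoryKeysB.getD r "") = none := by
          rw [PySem.Dict.get?_eq_none_iff_not_mem_keys, ← hak]
          simpa using ha'
        rw [h0, Option.none_or, PySem.Dict.get?_mk_cons, if_pos (by simpa [List.getD] using hak), Option.some_or, hir]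
        rw [List.getD, List.getElem?_set_self (by omega : r < slots.length)]
        rfl
      · have hir : i.toNat ≠ r := fun h => hak (by rw [← hia, h])
        rw [ih hnt _ (by rw [List.length_set, hlen])]
        rw [PySem.Dict.get?_mk_cons, if_neg (by simpa [List.getD] using hak)]
        rw [show (slots.set i.toNat (some b)).getD r none = slots.getD r none from by
          simp only [List.getD]
          rw [List.getElem?_set_ne hir]]

-- dict built by inserting pairs with pairwise-distinct keys = the literal association list.
theorem pvOfList_eq_mk (L : List (String × String)) (h : (L.map Prod.fst).Nodup) :
    PySem.Dict.ofList L = PySem.Dict.mk L := by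
  apply PySem.Dict.ext
  have hfold : (PySem.Dict.ofList L).items
      = (L.foldl (fun (d : PySem.Dict String String) kv => d.insert kv.1 kv.2) PySem.Dict.empty).items := rfl
  rw [hfold, PySem.Dict.items_foldl_insert_fresh L Prod.fst Prod.snd PySem.Dict.empty
        (fun a _ => PySem.Dict.contains_empty _) h]
  simp [PySem.Dict.empty]

-- keys of the assembled list are the (distinct) history keys whose lookup succeeds
theorem pvMap_fst_filterMap (ks : List String) (f : String → Option String) :
    (ks.filterMap (fun k => (f k).map (fun v => (k, v)))).map Prod.fst
      = ks.filter (fun k => (f k).isSome) := by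
  induction ks with
  | nil => rfl
  | cons k t ih =>
    cases h : f k <;> simp [h, ih]

theorem extract_modification_history_py_spec : Claim_equal_extract_modification_history_py := by
  intro properties _hdom hpre
  unfold Spec_extract_modification_history_py
  unfold extract_modification_history_py extract_modification_history_py_alt
  simp only []
  rw [pvFoldA_items ["Revision Number", "Total Edit Time", "Last Printed", "Security", "Shared", "Doc Security"] (PySem.Dict.mk properties) PySem.Dict.empty
        (by decide) (by intro k _; exact PySem.Dict.contains_empty _)]
  have hslot : ∀ r ∈ List.range pvHistoryKeysB.length,
      ((properties.foldl (fun (slots : List (Option String)) kv =>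
          match pvRankB.get? kv.1 with
          | some i => slots.set i.toNat (some kv.2)
          | none   => slots) (List.replicate pvHistoryKeysB.length none)).getD r none)
        = (PySem.Dict.mk properties).get? (pvHistoryKeysB.getD r "") := by
    intro r hrm
    have hr : r < 6 := (show pvHistoryKeysB.length = 6 from rfl) ▸ List.mem_range.mp hrm
    rw [pvSlots_spec properties hpre _ (by rfl) r hr]
    have : (List.replicate pvHistoryKeysB.length (none : Option String)).getD r none = none := by
      simp [List.getD]
    rw [this, Option.or_none]
  have hL : (List.range pvHistoryKeysB.length).filterMap
      (fun i => (((properties.foldl (fun (slots : List (Option String)) kv =>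
          match pvRankB.get? kv.1 with
          | some i => slots.set i.toNat (some kv.2)
          | none   => slots) (List.replicate pvHistoryKeysB.length none)).getD i none)).map
            (fun v => (pvHistoryKeysB.getD i "", v)))
      = ["Revision Number", "Total Edit Time", "Last Printed", "Security", "Shared", "Doc Security"].filterMap
          (fun k => ((PySem.Dict.mk properties).get? k).map (fun v => (k, v))) := by
    rw [List.filterMap_congr (fun i hi => by rw [hslot i hi])]
    have h6 : List.range pvHistoryKeysB.length = [0, 1, 2, 3, 4, 5] := by decide
    rw [h6]
    simp only [List.filterMap_cons, List.filterMap_nil, pvHistoryKeysB, List.getD]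
    rfl
  rw [hL]
  have hndo : ((["Revision Number", "Total Edit Time", "Last Printed", "Security", "Shared", "Doc Security"].filterMap
      (fun k => ((PySem.Dict.mk properties).get? k).map (fun v => (k, v)))).map Prod.fst).Nodup := by
    rw [pvMap_fst_filterMap]
    exact List.Nodup.filter _ (by decide)
  rw [pvOfList_eq_mk _ hndo]
  rfl
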